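-- pv_equiv track=rewrite | github.com/DWitek97/GeneticMiner | etc/CausalMatrix.py | getAllActivites
-- ===== SOURCE A (Python) =====
-- def getAllActivites(log):
--     causalMatrix = [
--         [],
--         [],
--         []
--     ]
--     for trace in log:
--         for activity in trace:
--             if activity not in causalMatrix[0]:
--                 causalMatrix[0].append(activity)
--
--     causalMatrix[0].sort()
--
--     return causalMatrix
-- ===== SOURCE B (Python) =====
-- def getAllActivites(log):
--     flat = []
--     for trace in log:
--         flat.extend(trace)
--     flat.sort()
--     unique = []
--     for x in flat:
--         if not unique or unique[-1] != x:
--             unique.append(x)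
--     return [unique, [], []]
-- ===== Notes on version B (the rewrite author's own statement) =====
-- stated objective: faster
-- what changed: Replaces A's per-activity membership scan over the growing unique list (then a final sort) by flattening all traces, sorting once, and collapsing adjacent duplicates in a single pass.
import Mathlib
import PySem

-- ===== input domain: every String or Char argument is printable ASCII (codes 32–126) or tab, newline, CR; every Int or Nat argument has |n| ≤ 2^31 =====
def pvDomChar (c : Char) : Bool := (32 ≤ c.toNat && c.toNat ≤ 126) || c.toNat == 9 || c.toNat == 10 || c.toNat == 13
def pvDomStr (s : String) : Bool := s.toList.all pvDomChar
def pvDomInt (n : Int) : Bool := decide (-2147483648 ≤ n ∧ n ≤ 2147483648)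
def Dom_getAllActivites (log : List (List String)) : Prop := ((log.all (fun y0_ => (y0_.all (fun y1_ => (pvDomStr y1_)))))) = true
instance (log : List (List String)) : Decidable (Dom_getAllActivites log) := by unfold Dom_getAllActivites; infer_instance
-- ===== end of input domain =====

-- B replaces A's per-activity membership scan over the growing unique list by
-- flatten + sort + one adjacent-duplicate-collapsing pass (objective: faster — O(n log n) vs quadratic membership scans; confirmed).

-- ===== PORT A =====
def getAllActivites (log : List (List String)) : List (List String) :=
  -- causalMatrix[0] built by the nested loops, appending unseen activities
  let c0 := log.foldl
    (fun acc trace =>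
      trace.foldl (fun acc activity => if activity ∈ acc then acc else acc ++ [activity]) acc) []
  [PySem.List.sorted c0 (fun x => x) false, [], []]

-- ===== PORT B =====
def getAllActivites_alt (log : List (List String)) : List (List String) :=
  let flat := log.foldl (fun acc trace => acc ++ trace) []
  let sortedFlat := PySem.List.sorted flat (fun x => x) false
  let unique := sortedFlat.foldl
    (fun acc x =>
      if acc = [] then acc ++ [x]
      else if acc.getLast? ≠ some x then acc ++ [x] else acc) []
  [unique, [], []]

-- ===== PRECONDITION & SPEC =====
def Spec_getAllActivites (log : List (List String)) (out : List (List String)) : Prop := out = getAllActivites_alt log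
instance (log : List (List String)) (out : List (List String)) : Decidable (Spec_getAllActivites log out) := by unfold Spec_getAllActivites; infer_instance

-- ===== CLAIM (what is proved, stated in full; the proofs are below) =====
def Claim_equal_getAllActivites : Prop := ∀ (log : List (List String)), Dom_getAllActivites log → Spec_getAllActivites log (getAllActivites log)

-- ===== LEMMAS AND PROOFS =====

-- A's accumulation is set-insertion over the flattened log
theorem aFold_eq_ofList (log : List (List String)) (s : PySem.Set String) :
    log.foldl
      (fun acc trace =>
        trace.foldl (fun acc activity => if activity ∈ acc then acc else acc ++ [activity]) acc) s
      = PySem.Set.update s log.flatten := by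
  induction log generalizing s with
  | nil => simp [PySem.Set.update]
  | cons t ts ih =>
      have hstep : (fun (acc : List String) (activity : String) =>
          if activity ∈ acc then acc else acc ++ [activity]) = PySem.Set.add := by
        funext acc x
        simp [PySem.Set.add, PySem.Set.contains]
      simp only [List.foldl_cons, List.flatten_cons]
      rw [ih]
      simp [PySem.Set.update, hstep, List.foldl_append]

theorem bFlat_eq_flatten (log : List (List String)) (acc : List String) :
    log.foldl (fun acc trace => acc ++ trace) acc = acc ++ log.flatten := by
  induction log generalizing acc with
  | nil => simp
  | cons t ts ih => simp [ih]

-- the structural form of B's adjacent-dedup loop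
def pvCollapse : List String → List String
  | [] => []
  | [x] => [x]
  | x :: y :: t => if x = y then pvCollapse (y :: t) else x :: pvCollapse (y :: t)

theorem bFold_eq_collapse_aux (xs : List String) (r : List String) (a : String) :
    xs.foldl
      (fun acc x =>
        if acc = [] then acc ++ [x]
        else if acc.getLast? ≠ some x then acc ++ [x] else acc) (r ++ [a])
      = r ++ pvCollapse (a :: xs) := by
  induction xs generalizing r a with
  | nil => simp [pvCollapse]
  | cons x xs ih =>
      simp only [List.foldl_cons]
      have hne : r ++ [a] ≠ [] := by simp
      have hlast : (r ++ [a]).getLast? = some a := by simp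
      rw [if_neg hne]
      by_cases hax : a = x
      · subst hax
        rw [if_neg (by simp [hlast]), ih r a]
        simp [pvCollapse]
      · rw [if_pos (by simp [hlast, hax]),
            show r ++ [a] ++ [x] = (r ++ [a]) ++ [x] from rfl, ih (r ++ [a]) x]
        simp [pvCollapse, hax]

theorem bFold_eq_collapse (xs : List String) :
    xs.foldl
      (fun acc x =>
        if acc = [] then acc ++ [x]
        else if acc.getLast? ≠ some x then acc ++ [x] else acc) []
      = pvCollapse xs := by
  cases xs with
  | nil => simp [pvCollapse]
  | cons x xs =>
      simp only [List.foldl_cons, List.nil_append]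
      have := bFold_eq_collapse_aux xs [] x
      simpa using this

theorem mem_pvCollapse (y : String) : ∀ (xs : List String), y ∈ pvCollapse xs ↔ y ∈ xs
  | [] => by simp [pvCollapse]
  | [x] => by simp [pvCollapse]
  | x :: z :: t => by
      by_cases h : x = z
      · subst h
        simp [pvCollapse, mem_pvCollapse y (x :: t)]
      · simp [pvCollapse, h, mem_pvCollapse y (z :: t)]

theorem pairwise_lt_pvCollapse : ∀ (xs : List String),
    xs.Pairwise (· ≤ ·) → (pvCollapse xs).Pairwise (· < ·)
  | [], _ => by simp [pvCollapse]
  | [x], _ => by simp [pvCollapse]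
  | x :: z :: t, h => by
      have htail : (z :: t).Pairwise (· ≤ ·) := h.tail
      have ih := pairwise_lt_pvCollapse (z :: t) htail
      by_cases hxz : x = z
      · simpa [pvCollapse, hxz] using ih
      · have hxle : x ≤ z := (List.pairwise_cons.mp h).1 z (by simp)
        have hxlt : x < z := lt_of_le_of_ne hxle hxz
        simp only [pvCollapse, if_neg hxz]
        refine List.pairwise_cons.mpr ⟨?_, ih⟩
        intro w hw
        rcases List.mem_cons.mp ((mem_pvCollapse w (z :: t)).mp hw) with h1 | h2
        · exact h1 ▸ hxlt
        · exact lt_of_lt_of_le hxlt ((List.pairwise_cons.mp htail).1 w h2)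

theorem collapse_is_sorted_ofList (flat : List String) :
    PySem.List.sorted (PySem.Set.ofList flat) (fun x => x) false
      = pvCollapse (PySem.List.sorted flat (fun x => x) false) := by
  apply PySem.List.sorted_eq_of_perm_of_pairwise_lt
  · -- permutation: both are nodup with the same members
    have hn1 : (pvCollapse (PySem.List.sorted flat (fun x => x) false)).Nodup := by
      have := pairwise_lt_pvCollapse (PySem.List.sorted flat (fun x => x) false)
        (by simpa using PySem.List.sorted_pairwise flat (fun x => x))
      exact this.imp ne_of_lt
    have hn2 : (PySem.Set.ofList flat).Nodup := PySem.Set.nodup_ofList flat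
    rw [List.perm_ext_iff_of_nodup hn1 hn2]
    intro a
    rw [mem_pvCollapse, PySem.List.mem_sorted, PySem.Set.mem_ofList]
  · simpa using pairwise_lt_pvCollapse (PySem.List.sorted flat (fun x => x) false)
      (by simpa using PySem.List.sorted_pairwise flat (fun x => x))

-- ===== VERDICT (by name: the statement is the Claim_ definition above) =====
theorem getAllActivites_spec : Claim_equal_getAllActivites := by
  intro log _
  show getAllActivites log = getAllActivites_alt log
  unfold getAllActivites getAllActivites_alt
  simp only [aFold_eq_ofList, bFlat_eq_flatten, bFold_eq_collapse, List.nil_append]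
  have : PySem.Set.update ([] : PySem.Set String) log.flatten = PySem.Set.ofList log.flatten := rfl
  rw [this, collapse_is_sorted_ofList]
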